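-- pv_equiv track=rewrite | github.com/NahueTomas/tp-final-ungs | funciones/letras/letrasIncorrecta.py | letrasIncorrecta
-- ===== SOURCE A (Python) =====
-- def letrasIncorrecta(palabraCorrecta, palabra, casi, correctas):
--     palabraMin = palabra.lower()
--     palabraCorrectaMin = palabraCorrecta.lower()
--     incorrectas = []
--     for letra in palabraMin:  # incorrectas
--         if not (letra in correctas or letra in casi):
--             incorrectas.append(True)
--     return incorrectas
-- ===== SOURCE B (Python) =====
-- def letrasIncorrecta(palabraCorrecta, palabra, casi, correctas):
--     # Stage 1: erase every known letter from the lowered word,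
--     # one known letter at a time (loop over the known alphabet, not the word).
--     restantes = list(palabra.lower())
--     for conocida in correctas + casi:
--         restantes = [ch for ch in restantes if ch != conocida]
--     # Stage 2: one True per surviving (unknown) letter.
--     return [True for _ in restantes]
-- ===== Notes on version B (the rewrite author's own statement) =====
-- stated objective: alternative
-- what changed: B inverts the traversal: instead of one pass over the word testing each letter for membership in correctas/casi and appending True, it loops over the known alphabet (correctas + casi) and successively erases each known letter from the lowered word, then emits one True per surviving letter.
import Mathlib
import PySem

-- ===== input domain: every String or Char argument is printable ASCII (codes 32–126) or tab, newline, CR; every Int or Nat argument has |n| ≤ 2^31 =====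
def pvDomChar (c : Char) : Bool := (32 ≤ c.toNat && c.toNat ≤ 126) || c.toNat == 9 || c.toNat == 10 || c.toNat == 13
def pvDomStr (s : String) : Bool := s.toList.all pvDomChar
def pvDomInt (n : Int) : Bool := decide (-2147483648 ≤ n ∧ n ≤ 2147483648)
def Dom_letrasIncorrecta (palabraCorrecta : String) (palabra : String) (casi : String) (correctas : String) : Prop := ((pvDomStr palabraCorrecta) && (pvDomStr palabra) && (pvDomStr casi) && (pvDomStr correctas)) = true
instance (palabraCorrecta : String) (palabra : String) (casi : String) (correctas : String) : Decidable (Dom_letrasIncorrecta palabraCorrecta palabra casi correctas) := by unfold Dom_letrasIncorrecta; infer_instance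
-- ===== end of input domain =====

-- ===== PORT A =====
-- B inverts the traversal: it erases each known letter (correctas + casi) from the lowered word,
-- then emits one True per survivor; an alternative decomposition, no speed claim.
def letrasIncorrecta (palabraCorrecta : String) (palabra : String) (casi : String) (correctas : String) : List Bool :=
  let palabraMin := PySem.Str.lower palabra
  let _palabraCorrectaMin := PySem.Str.lower palabraCorrecta
  palabraMin.toList.foldl
    (fun incorrectas letra =>
      if ¬ (correctas.toList.contains letra || casi.toList.contains letra) then
        incorrectas ++ [true]
      else incorrectas) []

-- ===== PORT B =====
def letrasIncorrecta_alt (palabraCorrecta : String) (palabra : String) (casi : String) (correctas : String) : List Bool :=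
  let restantes := (correctas.toList ++ casi.toList).foldl
    (fun restantes conocida => restantes.filter (fun ch => ch ≠ conocida))
    (PySem.Str.lower palabra).toList
  restantes.map (fun _ => true)

-- ===== PRECONDITION & SPEC =====
def Spec_letrasIncorrecta (palabraCorrecta : String) (palabra : String) (casi : String) (correctas : String) (out : List Bool) : Prop := out = letrasIncorrecta_alt palabraCorrecta palabra casi correctas
instance (palabraCorrecta : String) (palabra : String) (casi : String) (correctas : String) (out : List Bool) : Decidable (Spec_letrasIncorrecta palabraCorrecta palabra casi correctas out) := by unfold Spec_letrasIncorrecta; infer_instance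

-- ===== CLAIM =====
def Claim_equal_letrasIncorrecta : Prop := ∀ (palabraCorrecta : String) (palabra : String) (casi : String) (correctas : String), Dom_letrasIncorrecta palabraCorrecta palabra casi correctas → Spec_letrasIncorrecta palabraCorrecta palabra casi correctas (letrasIncorrecta palabraCorrecta palabra casi correctas)

-- ===== LEMMAS AND PROOFS =====

-- A's append-per-letter loop produces one `true` per letter passing the test.
theorem foldl_append_true_eq_map_filter (p : Char → Bool) (l : List Char) (acc : List Bool) :
    l.foldl (fun a c => if ¬ (p c) then a ++ [true] else a) acc
      = acc ++ ((l.filter (fun c => !(p c))).map (fun _ => true)) := by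
  induction l generalizing acc with
  | nil => simp
  | cons x xs ih =>
    by_cases h : p x
    · rw [List.foldl_cons, if_neg (by simp [h]), ih, List.filter_cons]
      simp [h]
    · rw [List.foldl_cons, if_pos (by simp [h]), ih, List.filter_cons]
      simp [h]

-- B's staged erasure of each known letter equals one filter by non-membership.
theorem foldl_filter_ne_eq_filter_not_mem (ks : List Char) (w : List Char) :
    ks.foldl (fun r c => r.filter (fun ch => ch ≠ c)) w
      = w.filter (fun ch => !(ks.contains ch)) := by
  induction ks generalizing w with
  | nil => simp
  | cons k ks ih =>
    rw [List.foldl_cons, ih, List.filter_filter]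
    apply List.filter_congr
    intro x _
    by_cases hx : x = k <;> simp [hx]

-- ===== VERDICT =====
theorem letrasIncorrecta_spec : Claim_equal_letrasIncorrecta := by
  intro pc p ca co _
  unfold Spec_letrasIncorrecta letrasIncorrecta letrasIncorrecta_alt
  rw [foldl_append_true_eq_map_filter, foldl_filter_ne_eq_filter_not_mem]
  simp only [List.nil_append]
  congr 1
  apply List.filter_congr
  intro x _
  simp
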